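-- pv_equiv track=rewrite | github.com/pier-car/Advanced_Optical_Profiler | views/dialogs/login_dialog.py | _validate_operator_id
-- ===== SOURCE A (Python) =====
-- def _validate_operator_id(text: str) -> bool:
--     """
--     Valida l'ID operatore.
--     Regole: minimo 2 caratteri, solo alfanumerici, punti e underscore.
--     """
--     if len(text) < 2:
--         return False
--     allowed_chars = set(
--         "abcdefghijklmnopqrstuvwxyz"
--         "ABCDEFGHIJKLMNOPQRSTUVWXYZ"
--         "0123456789._"
--     )
--     return all(c in allowed_chars for c in text)
-- ===== SOURCE B (Python) =====
-- import re
--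
-- _OPERATOR_ID_RE = re.compile(r'[A-Za-z0-9._]{2,}')
--
-- def _validate_operator_id(text: str) -> bool:
--     """
--     Valida l'ID operatore.
--     Regole: minimo 2 caratteri, solo alfanumerici, punti e underscore.
--     """
--     return _OPERATOR_ID_RE.fullmatch(text) is not None
-- ===== Notes on version B (the rewrite author's own statement) =====
-- stated objective: idiomatic
-- what changed: Replaces the explicit length guard and the all(...) membership scan over a set built from a literal string with a single precompiled regex fullmatch of [A-Za-z0-9._]{2,}.
import Mathlib
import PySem

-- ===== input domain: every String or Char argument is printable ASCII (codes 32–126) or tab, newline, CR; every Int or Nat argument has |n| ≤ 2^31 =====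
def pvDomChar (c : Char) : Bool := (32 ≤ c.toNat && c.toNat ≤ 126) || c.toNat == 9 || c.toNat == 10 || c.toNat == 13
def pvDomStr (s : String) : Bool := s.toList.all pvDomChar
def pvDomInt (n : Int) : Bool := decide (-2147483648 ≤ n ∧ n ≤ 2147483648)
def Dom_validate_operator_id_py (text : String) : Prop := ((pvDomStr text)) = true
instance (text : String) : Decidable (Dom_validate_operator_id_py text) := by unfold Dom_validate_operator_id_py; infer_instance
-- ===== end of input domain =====

-- B validates the operator ID by the single regex fullmatch [A-Za-z0-9._]{2,} instead of
-- an explicit length guard plus an all(...) membership scan over a set literal (idiomatic).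


-- ===== PORT A =====
-- allowed_chars = set("abc…XYZ0123456789._")
def pvAllowedChars : PySem.Set Char :=
  PySem.Set.ofList
    ("abcdefghijklmnopqrstuvwxyzABCDEFGHIJKLMNOPQRSTUVWXYZ0123456789._".toList)

def validate_operator_id_py (text : String) : Bool :=
  if PySem.Str.len text < 2 then false
  else text.toList.all (fun c => PySem.Set.contains pvAllowedChars c)

-- ===== PORT B =====
-- the character class [A-Za-z0-9._] of B's regex
def pvClassChar (c : Char) : Bool :=
  ('A' ≤ c && c ≤ 'Z') || ('a' ≤ c && c ≤ 'z') || ('0' ≤ c && c ≤ '9') || c == '.' || c == '_'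

-- fullmatch of [A-Za-z0-9._]{2,}: at least 2 characters, each in the class
def validate_operator_id_py_alt (text : String) : Bool :=
  decide (2 ≤ PySem.Str.len text) && text.toList.all pvClassChar

-- ===== PRECONDITION & SPEC =====
def Spec_validate_operator_id_py (text : String) (out : Bool) : Prop := out = validate_operator_id_py_alt text
instance (text : String) (out : Bool) : Decidable (Spec_validate_operator_id_py text out) := by unfold Spec_validate_operator_id_py; infer_instance

-- ===== CLAIM (what is proved, stated in full; the proofs are below) =====
def Claim_equal_validate_operator_id_py : Prop := ∀ (text : String), Dom_validate_operator_id_py text → Spec_validate_operator_id_py text (validate_operator_id_py text)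

-- ===== LEMMAS AND PROOFS =====

-- on every valid codepoint below 127 the set-membership test and the regex class agree (checked by evaluation)
lemma pyAll_congr_mem {α : Type} {l : List α} {p q : α → Bool}
    (h : ∀ a ∈ l, p a = q a) : l.all p = l.all q := by
  induction l with
  | nil => rfl
  | cons x xs ih =>
    simp only [List.all_cons, h x (List.mem_cons_self), ih (fun a ha => h a (List.mem_cons_of_mem x ha))]

set_option maxRecDepth 8192 in
lemma contains_eq_class_fin : ∀ n : Fin 127,
    PySem.Set.contains pvAllowedChars (Char.ofNat n) = pvClassChar (Char.ofNat n) := by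
  decide

lemma contains_eq_class (c : Char) (h : c.toNat ≤ 126) :
    PySem.Set.contains pvAllowedChars c = pvClassChar c := by
  have hc : Char.ofNat c.toNat = c := Char.ofNat_toNat c
  have := contains_eq_class_fin ⟨c.toNat, by omega⟩
  simpa [hc] using this

-- ===== VERDICT (by name: the statement is the Claim_ definition above) =====
theorem validate_operator_id_py_spec : Claim_equal_validate_operator_id_py := by
  intro text hdom
  unfold Spec_validate_operator_id_py validate_operator_id_py validate_operator_id_py_alt
  have hall : text.toList.all (fun c => PySem.Set.contains pvAllowedChars c)
      = text.toList.all pvClassChar := by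
    apply pyAll_congr_mem
    intro c hc
    have hd : pvDomChar c = true := by
      have := hdom
      unfold Dom_validate_operator_id_py pvDomStr at this
      exact (List.all_eq_true.mp this) c hc
    have h126 : c.toNat ≤ 126 := by
      unfold pvDomChar at hd
      simp only [Bool.or_eq_true, Bool.and_eq_true, decide_eq_true_eq, beq_iff_eq] at hd
      omega
    exact contains_eq_class c h126
  rw [hall]
  by_cases hlen : PySem.Str.len text < 2
  · rw [if_pos hlen, decide_eq_false (by omega), Bool.false_and]
  · rw [if_neg hlen, decide_eq_true (by omega : 2 ≤ PySem.Str.len text), Bool.true_and]
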